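-- pv_equiv track=rewrite | github.com/Architolb/hw-week2 | whiteboard-prac.py | fix_string
-- ===== SOURCE A (Python) =====
-- def fix_string(s):
--     new_sentence=""
--     for letter in s:
--         if letter.lower()=='y':
--             new_sentence+=letter+"!"
--         elif letter.lower()=='s':
--             new_sentence+=letter+"."
--         elif letter.lower()=='w' or letter.lower()=='g':
--             new_sentence+=letter.upper()
--         else:
--             new_sentence+=letter
--     return new_sentence
-- ===== SOURCE B (Python) =====
-- _TABLE = str.maketrans({'y': 'y!', 'Y': 'Y!', 's': 's.', 'S': 'S.',
--                         'w': 'W', 'W': 'W', 'g': 'G', 'G': 'G'})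
--
--
-- def fix_string(s):
--     return s.translate(_TABLE)
-- ===== Notes on version B (the rewrite author's own statement) =====
-- stated objective: idiomatic
-- what changed: Replaced the per-character branch ladder with repeated string concatenation by a constant translation table built once via str.maketrans and a single s.translate call.
import Mathlib
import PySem

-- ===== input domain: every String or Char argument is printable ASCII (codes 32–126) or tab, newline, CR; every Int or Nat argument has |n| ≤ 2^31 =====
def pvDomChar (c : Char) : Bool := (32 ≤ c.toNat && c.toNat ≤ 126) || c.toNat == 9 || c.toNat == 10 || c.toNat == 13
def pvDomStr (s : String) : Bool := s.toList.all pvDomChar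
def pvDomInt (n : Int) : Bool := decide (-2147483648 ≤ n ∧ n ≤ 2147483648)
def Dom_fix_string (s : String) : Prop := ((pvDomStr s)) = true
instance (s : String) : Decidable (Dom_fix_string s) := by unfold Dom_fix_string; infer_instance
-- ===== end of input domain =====

-- B replaces A's per-character branch ladder with a constant translation table
-- consulted in a single pass (Python: str.maketrans + s.translate); idiomatic rewrite.

-- ===== PORT A =====
def fix_string (s : String) : String :=
  String.mk (s.toList.foldl (fun new_sentence letter =>
    if PySem.Chars.lowerChar letter == 'y' then
      new_sentence ++ [letter, '!']
    else if PySem.Chars.lowerChar letter == 's' then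
      new_sentence ++ [letter, '.']
    else if PySem.Chars.lowerChar letter == 'w' || PySem.Chars.lowerChar letter == 'g' then
      new_sentence ++ [PySem.Chars.upperChar letter]
    else
      new_sentence ++ [letter]) [])

-- ===== PORT B =====
-- the translation table, built once (port of str.maketrans's dict)
def pvTable : PySem.Dict Char (List Char) :=
  ⟨[('y', ['y', '!']), ('Y', ['Y', '!']), ('s', ['s', '.']), ('S', ['S', '.']),
    ('w', ['W']), ('W', ['W']), ('g', ['G']), ('G', ['G'])]⟩

-- port of s.translate(table): each char is replaced by its table entry, unmapped chars kept
def fix_string_alt (s : String) : String :=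
  String.mk (s.toList.flatMap (fun c => (pvTable.get? c).getD [c]))

-- ===== PRECONDITION & SPEC =====
def Spec_fix_string (s : String) (out : String) : Prop := out = fix_string_alt s
instance (s : String) (out : String) : Decidable (Spec_fix_string s out) := by unfold Spec_fix_string; infer_instance

-- ===== CLAIM (what is proved, stated in full; the proofs are below) =====
def Claim_equal_fix_string : Prop := ∀ (s : String), Dom_fix_string s → Spec_fix_string s (fix_string s)

-- ===== LEMMAS AND PROOFS =====

theorem pv_toNat_inj {c d : Char} (h : c.toNat = d.toNat) : c = d :=
  Char.ext (UInt32.toNat_inj.mp h)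

theorem pv_ofNat_toNat {n : Nat} (h : n < 55296) : (Char.ofNat n).toNat = n := by
  have hv : n.isValidChar := Or.inl h
  simp [Char.ofNat, hv, Char.ofNatAux, Char.toNat]

-- characterises A's per-letter test: lowerChar c = t (t a lowercase letter) iff c is t or its uppercase form
theorem pv_lower_eq (c : Char) (t : Char) (ht : 97 ≤ t.toNat) (ht2 : t.toNat ≤ 122) :
    PySem.Chars.lowerChar c = t ↔ (c = t ∨ c.toNat + 32 = t.toNat) := by
  unfold PySem.Chars.lowerChar PySem.Chars.isupper
  have h65 : ('A' : Char).val.toNat = 65 := by decide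
  have h90 : ('Z' : Char).val.toNat = 90 := by decide
  have hc : c.toNat = c.val.toNat := rfl
  split_ifs with h
  · simp only [Bool.and_eq_true, decide_eq_true_eq, Char.le_def, UInt32.le_iff_toNat_le] at h
    have hlo : 65 ≤ c.toNat := by omega
    have hhi : c.toNat ≤ 90 := by omega
    have hof : (Char.ofNat (c.toNat + 32)).toNat = c.toNat + 32 := pv_ofNat_toNat (by omega)
    constructor
    · intro he
      right
      have := congrArg Char.toNat he
      omega
    · rintro (rfl | he)
      · omega
      · exact pv_toNat_inj (by omega)
  · simp only [Bool.and_eq_true, decide_eq_true_eq, Char.le_def, UInt32.le_iff_toNat_le,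
      not_and_or, not_le] at h
    have hout : c.toNat < 65 ∨ 90 < c.toNat := by omega
    constructor
    · intro he; exact Or.inl he
    · rintro (rfl | he)
      · rfl
      · omega

-- one letter: A's branch ladder equals B's table entry
theorem pv_step_eq (c : Char) :
    (if PySem.Chars.lowerChar c == 'y' then [c, '!']
     else if PySem.Chars.lowerChar c == 's' then [c, '.']
     else if PySem.Chars.lowerChar c == 'w' || PySem.Chars.lowerChar c == 'g' then
       [PySem.Chars.upperChar c]
     else [c]) = (pvTable.get? c).getD [c] := by
  have hy := pv_lower_eq c 'y' (by decide) (by decide)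
  have hs := pv_lower_eq c 's' (by decide) (by decide)
  have hw := pv_lower_eq c 'w' (by decide) (by decide)
  have hg := pv_lower_eq c 'g' (by decide) (by decide)
  by_cases h1 : c = 'y'; · subst h1; decide
  by_cases h2 : c = 'Y'; · subst h2; decide
  by_cases h3 : c = 's'; · subst h3; decide
  by_cases h4 : c = 'S'; · subst h4; decide
  by_cases h5 : c = 'w'; · subst h5; decide
  by_cases h6 : c = 'W'; · subst h6; decide
  by_cases h7 : c = 'g'; · subst h7; decide
  by_cases h8 : c = 'G'; · subst h8; decide
  have hny : PySem.Chars.lowerChar c ≠ 'y' := by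
    intro h; rcases hy.mp h with h | h
    · exact h1 h
    · refine h2 (pv_toNat_inj ?_)
      have e : ('y' : Char).toNat = 121 := by decide
      have e2 : ('Y' : Char).toNat = 89 := by decide
      omega
  have hns : PySem.Chars.lowerChar c ≠ 's' := by
    intro h; rcases hs.mp h with h | h
    · exact h3 h
    · refine h4 (pv_toNat_inj ?_)
      have e : ('s' : Char).toNat = 115 := by decide
      have e2 : ('S' : Char).toNat = 83 := by decide
      omega
  have hnw : PySem.Chars.lowerChar c ≠ 'w' := by
    intro h; rcases hw.mp h with h | h
    · exact h5 h
    · refine h6 (pv_toNat_inj ?_)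
      have e : ('w' : Char).toNat = 119 := by decide
      have e2 : ('W' : Char).toNat = 87 := by decide
      omega
  have hng : PySem.Chars.lowerChar c ≠ 'g' := by
    intro h; rcases hg.mp h with h | h
    · exact h7 h
    · refine h8 (pv_toNat_inj ?_)
      have e : ('g' : Char).toNat = 103 := by decide
      have e2 : ('G' : Char).toNat = 71 := by decide
      omega
  have hget : pvTable.get? c = none := by
    simp only [pvTable, PySem.Dict.get?, List.lookup, Option.map_eq_none_iff,
      List.find?_eq_none, List.mem_cons, List.not_mem_nil, or_false, beq_iff_eq]
    rintro x (rfl|rfl|rfl|rfl|rfl|rfl|rfl|rfl) <;> simp_all [eq_comm]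
  simp [hget, beq_iff_eq, hny, hns, hnw, hng]

theorem fix_string_spec : Claim_equal_fix_string := by
  intro s _
  unfold Spec_fix_string fix_string fix_string_alt
  congr 1
  have : ∀ (l : List Char) (acc : List Char),
      l.foldl (fun new_sentence letter =>
        if PySem.Chars.lowerChar letter == 'y' then new_sentence ++ [letter, '!']
        else if PySem.Chars.lowerChar letter == 's' then new_sentence ++ [letter, '.']
        else if PySem.Chars.lowerChar letter == 'w' || PySem.Chars.lowerChar letter == 'g' then
          new_sentence ++ [PySem.Chars.upperChar letter]
        else new_sentence ++ [letter]) acc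
      = acc ++ l.flatMap (fun c => (pvTable.get? c).getD [c]) := by
    intro l
    induction l with
    | nil => simp
    | cons c l ih =>
      intro acc
      simp only [List.foldl_cons, List.flatMap_cons]
      have hpull :
          (if PySem.Chars.lowerChar c == 'y' then acc ++ [c, '!']
           else if PySem.Chars.lowerChar c == 's' then acc ++ [c, '.']
           else if PySem.Chars.lowerChar c == 'w' || PySem.Chars.lowerChar c == 'g' then
             acc ++ [PySem.Chars.upperChar c]
           else acc ++ [c]) = acc ++ (pvTable.get? c).getD [c] := by
        rw [← pv_step_eq c]; split_ifs <;> rfl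
      rw [ih, hpull, List.append_assoc]
  simpa using this s.toList []
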